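-- pv_equiv track=rewrite | github.com/GregorStocks/ramekin | scripts/find-ios-simulator.py | find_simulator
-- ===== SOURCE A (Python) =====
-- def find_simulator(data: dict) -> str:
--     # First pass: look for iPhone 16
--     for runtime, devices in data["devices"].items():
--         if "iOS" not in runtime:
--             continue
--         for dev in devices:
--             name = dev["name"]
--             if "iPhone" in name and "16" in name:
--                 return name
--
--     # Second pass: any iPhone
--     for runtime, devices in data["devices"].items():
--         if "iOS" not in runtime:
--             continue
--         for dev in devices:
--             name = dev["name"]
--             if "iPhone" in name:
--                 return name
--
--     # Fallback
--     return "iPhone SE (3rd generation)"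
-- ===== SOURCE B (Python) =====
-- def find_simulator(data: dict) -> str:
--     # One traversal: return the first iPhone-16 immediately, remember the first plain iPhone.
--     plain = None
--     for runtime, devices in data["devices"].items():
--         if "iOS" not in runtime:
--             continue
--         for dev in devices:
--             name = dev["name"]
--             if "iPhone" in name and "16" in name:
--                 return name
--             elif "iPhone" in name and plain is None:
--                 plain = name
--     return plain if plain is not None else "iPhone SE (3rd generation)"
-- ===== Notes on version B (the rewrite author's own statement) =====
-- stated objective: simpler
-- what changed: A scans the device map twice (first for an iPhone 16, then for any iPhone); B makes a single traversal that returns an iPhone-16 match immediately and remembers the first plain iPhone in an accumulator for the fallback.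
import Mathlib
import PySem

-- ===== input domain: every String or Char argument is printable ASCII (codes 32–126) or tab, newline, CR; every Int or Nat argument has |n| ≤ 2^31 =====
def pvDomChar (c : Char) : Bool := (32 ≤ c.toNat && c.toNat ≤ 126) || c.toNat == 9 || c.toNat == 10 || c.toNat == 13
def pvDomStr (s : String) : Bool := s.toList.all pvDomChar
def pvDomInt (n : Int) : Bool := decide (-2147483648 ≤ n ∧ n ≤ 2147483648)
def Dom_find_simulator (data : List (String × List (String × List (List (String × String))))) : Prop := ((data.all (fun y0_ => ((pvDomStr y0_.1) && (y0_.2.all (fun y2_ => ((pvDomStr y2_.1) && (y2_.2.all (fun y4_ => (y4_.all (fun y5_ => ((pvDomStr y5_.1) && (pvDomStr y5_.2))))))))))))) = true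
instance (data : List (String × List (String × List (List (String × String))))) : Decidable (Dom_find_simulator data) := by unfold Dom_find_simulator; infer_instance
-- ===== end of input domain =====

-- B fuses A's two scans of the device map into one traversal with a remembered
-- first-plain-iPhone accumulator (objective: simpler).

-- dict lookup (first match in the association list)
def pvLookup {V : Type} (d : List (String × V)) (k : String) : Option V :=
  match d with
  | [] => none
  | (k', v) :: rest => if k' == k then some v else pvLookup rest k

-- ===== PORT A =====
-- inner loop of A's first pass: first device whose name contains "iPhone" and "16"
def pvScan16 (devs : List (List (String × String))) : Option String :=
  match devs with
  | [] => none
  | dev :: rest =>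
    let name := (pvLookup dev "name").getD ""
    if PySem.Str.isIn "iPhone" name && PySem.Str.isIn "16" name then some name
    else pvScan16 rest

-- inner loop of A's second pass: first device whose name contains "iPhone"
def pvScanAny (devs : List (List (String × String))) : Option String :=
  match devs with
  | [] => none
  | dev :: rest =>
    let name := (pvLookup dev "name").getD ""
    if PySem.Str.isIn "iPhone" name then some name
    else pvScanAny rest

-- A's first pass over the runtimes
def pvPass16 (rts : List (String × List (List (String × String)))) : Option String :=
  match rts with
  | [] => none
  | (rt, devs) :: rest =>
    if PySem.Str.isIn "iOS" rt = false then pvPass16 rest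
    else match pvScan16 devs with
      | some n => some n
      | none => pvPass16 rest

-- A's second pass over the runtimes
def pvPassAny (rts : List (String × List (List (String × String)))) : Option String :=
  match rts with
  | [] => none
  | (rt, devs) :: rest =>
    if PySem.Str.isIn "iOS" rt = false then pvPassAny rest
    else match pvScanAny devs with
      | some n => some n
      | none => pvPassAny rest

def find_simulator (data : List (String × List (String × List (List (String × String))))) : String :=
  let rts := (pvLookup data "devices").getD []
  match pvPass16 rts with
  | some n => n
  | none =>
    match pvPassAny rts with
    | some n => n
    | none => "iPhone SE (3rd generation)"

-- ===== PORT B =====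
-- one scan of a runtime's devices: (iPhone-16 found?, updated remembered plain iPhone)
def pvAltScan (devs : List (List (String × String))) (plain : Option String) :
    Option String × Option String :=
  match devs with
  | [] => (none, plain)
  | dev :: rest =>
    let name := (pvLookup dev "name").getD ""
    if PySem.Str.isIn "iPhone" name && PySem.Str.isIn "16" name then (some name, plain)
    else
      pvAltScan rest
        (if PySem.Str.isIn "iPhone" name && plain.isNone then some name else plain)

-- B's single traversal of the runtimes, carrying the remembered plain iPhone
def pvAltGo (rts : List (String × List (List (String × String)))) (plain : Option String) : String :=
  match rts with
  | [] =>
    match plain with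
    | some p => p
    | none => "iPhone SE (3rd generation)"
  | (rt, devs) :: rest =>
    if PySem.Str.isIn "iOS" rt = false then pvAltGo rest plain
    else match pvAltScan devs plain with
      | (some n, _) => n
      | (none, plain') => pvAltGo rest plain'

def find_simulator_alt (data : List (String × List (String × List (List (String × String))))) : String :=
  pvAltGo ((pvLookup data "devices").getD []) none

-- ===== PRECONDITION & SPEC =====
-- Pre_ excludes inputs lacking a "devices" key and inputs where some device in an iOS
-- runtime lacks a "name" key: Python raises KeyError on such inputs unless an iPhone-16
-- device occurs before the nameless one (see the cite), so they are outside the claim.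
def Pre_find_simulator (data : List (String × List (String × List (List (String × String))))) : Prop :=
  "devices" ∈ data.map Prod.fst ∧
  ∀ p ∈ data, p.1 = "devices" →
    ∀ q ∈ p.2, PySem.Str.isIn "iOS" q.1 = true →
      ∀ dev ∈ q.2, "name" ∈ dev.map Prod.fst
instance (data : List (String × List (String × List (List (String × String))))) : Decidable (Pre_find_simulator data) := by unfold Pre_find_simulator; infer_instance

def pvWitness_find_simulator : (List (String × List (String × List (List (String × String))))) :=
  [("devices", [("iOS 17", [[("name", "iPhone 15")]])])]

def Spec_find_simulator (data : List (String × List (String × List (List (String × String))))) (out : String) : Prop := out = find_simulator_alt data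
instance (data : List (String × List (String × List (List (String × String))))) (out : String) : Decidable (Spec_find_simulator data out) := by unfold Spec_find_simulator; infer_instance

-- ===== CLAIM (what is proved, stated in full; the proofs are below) =====
def Claim_equal_find_simulator : Prop := ∀ (data : List (String × List (String × List (List (String × String))))), Dom_find_simulator data → Pre_find_simulator data → Spec_find_simulator data (find_simulator data)

-- ===== LEMMAS AND PROOFS =====

-- the found-16 component of B's scan is A's first-pass scan, independent of the accumulator
theorem pvAltScan_fst (devs : List (List (String × String))) (plain : Option String) :
    (pvAltScan devs plain).1 = pvScan16 devs := by
  induction devs generalizing plain with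
  | nil => rfl
  | cons dev rest ih =>
    simp only [pvAltScan, pvScan16]
    split
    · rfl
    · exact ih _

-- when no iPhone-16 is present, B's accumulator ends as the old one, else the first plain iPhone
theorem pvAltScan_snd (devs : List (List (String × String))) (plain : Option String)
    (h : pvScan16 devs = none) :
    (pvAltScan devs plain).2 =
      (match plain with | some p => some p | none => pvScanAny devs) := by
  induction devs generalizing plain with
  | nil => cases plain <;> rfl
  | cons dev rest ih =>
    simp only [pvScan16] at h
    simp only [pvAltScan, pvScanAny]
    split
    · rename_i h16
      rw [h16] at h
      exact absurd h (by simp)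
    · rename_i h16
      rw [if_neg h16] at h
      rw [ih _ h]
      cases hc : PySem.Str.isIn "iPhone" ((pvLookup dev "name").getD "") <;>
        cases plain <;> rfl

-- B's traversal computes A's two-pass result, for any accumulator
theorem pvAltGo_spec (rts : List (String × List (List (String × String)))) (plain : Option String) :
    pvAltGo rts plain =
      (match pvPass16 rts with
       | some n => n
       | none =>
         match plain with
         | some p => p
         | none =>
           match pvPassAny rts with
           | some n => n
           | none => "iPhone SE (3rd generation)") := by
  induction rts generalizing plain with
  | nil => cases plain <;> rfl
  | cons hd rest ih =>
    obtain ⟨rt, devs⟩ := hd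
    simp only [pvAltGo, pvPass16, pvPassAny]
    by_cases hios : PySem.Str.isIn "iOS" rt = false
    · simp only [if_pos hios, ih]
    · simp only [if_neg hios]
      cases hsc : pvAltScan devs plain with
      | mk f p' =>
        have hfst := pvAltScan_fst devs plain
        rw [hsc] at hfst
        simp only at hfst
        subst hfst
        cases h16 : pvScan16 devs with
        | some n => rfl
        | none =>
          have hsnd := pvAltScan_snd devs plain h16
          rw [hsc] at hsnd
          simp only at hsnd
          show pvAltGo rest p' = _
          rw [ih p']
          cases plain with
          | some p =>
            rw [hsnd]
          | none =>
            rw [hsnd]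
            cases hpa : pvScanAny devs with
            | some q => cases pvPass16 rest <;> rfl
            | none => cases pvPass16 rest <;> cases pvPassAny rest <;> rfl

-- ===== VERDICT (by name: the statement is the Claim_ definition above) =====
theorem find_simulator_spec : Claim_equal_find_simulator := by
  intro data _ _
  unfold Spec_find_simulator find_simulator find_simulator_alt
  rw [pvAltGo_spec]
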